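-- pv_equiv track=rewrite | github.com/qt-creator/qt-creator | src/libs/3rdparty/botan/configure.py | parse_lex_dict
-- ===== SOURCE A (Python) =====
-- class InternalError(Exception):
--     pass
--
-- def parse_lex_dict(as_list):
--     if len(as_list) % 3 != 0:
--         raise InternalError("Lex dictionary has invalid format (input not divisible by 3): %s" % as_list)
--
--     result = {}
--     for key, sep, value in [as_list[3*i:3*i+3] for i in range(0, len(as_list)//3)]:
--         if sep != '->':
--             raise InternalError("Lex dictionary has invalid format")
--         result[key] = value
--     return result
-- ===== SOURCE B (Python) =====
-- class InternalError(Exception):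
--     pass
--
-- def parse_lex_dict(as_list):
--     if len(as_list) % 3 != 0:
--         raise InternalError("Lex dictionary has invalid format (input not divisible by 3): %s" % as_list)
--     seps = as_list[1::3]
--     if any(sep != '->' for sep in seps):
--         raise InternalError("Lex dictionary has invalid format")
--     return dict(zip(as_list[0::3], as_list[2::3]))
-- ===== Notes on version B (the rewrite author's own statement) =====
-- stated objective: idiomatic
-- what changed: Instead of A's row-wise loop that slices out triple i and destructures it, B takes three stride slices (keys, separators, values), validates the separator column with any(), and builds the dict in one dict(zip(keys, values)) call.
import Mathlib
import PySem

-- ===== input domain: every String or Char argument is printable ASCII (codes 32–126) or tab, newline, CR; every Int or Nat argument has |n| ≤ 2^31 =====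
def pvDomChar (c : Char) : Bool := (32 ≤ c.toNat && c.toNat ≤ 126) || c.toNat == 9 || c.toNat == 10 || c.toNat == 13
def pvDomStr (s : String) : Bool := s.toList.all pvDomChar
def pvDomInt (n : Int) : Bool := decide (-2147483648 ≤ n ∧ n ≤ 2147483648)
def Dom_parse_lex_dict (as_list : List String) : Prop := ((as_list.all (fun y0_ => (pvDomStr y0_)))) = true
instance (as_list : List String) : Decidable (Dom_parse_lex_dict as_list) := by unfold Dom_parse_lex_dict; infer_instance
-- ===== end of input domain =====

-- B replaces A's row-wise triple slicing loop by three stride-column slices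
-- (keys/separators/values) validated with any() and combined via dict(zip(...)); same cost, more idiomatic.


-- ===== PORT A =====
-- the for-loop over the triple comprehension; 'raise InternalError' (excluded by Pre_) is
-- modelled by returning the current accumulator
def pldA_loop : List (List String) → PySem.Dict String String → PySem.Dict String String
  | [], result => result
  | t :: rest, result =>
    match t with
    | [key, sep, value] =>
        if sep ≠ "->" then result           -- raise InternalError("Lex dictionary has invalid format")
        else pldA_loop rest (result.insert key value)
    | _ => result                            -- unpacking error: unreachable, every slice has 3 elements

def parse_lex_dict (as_list : List String) : List (String × String) :=
  if PySem.Int.mod (as_list.length : Int) 3 ≠ 0 then []   -- raise InternalError (excluded by Pre_)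
  else
    (pldA_loop
      ((PySem.List.pyRange 0 (PySem.Int.floordiv (as_list.length : Int) 3) 1).map
        (fun i => PySem.List.slice as_list (some (3*i)) (some (3*i+3))))
      PySem.Dict.empty).items

-- ===== PORT B =====
def parse_lex_dict_alt (as_list : List String) : List (String × String) :=
  if PySem.Int.mod (as_list.length : Int) 3 ≠ 0 then []   -- raise InternalError (excluded by Pre_)
  else
    let seps := (PySem.List.slice? as_list (some 1) none 3).getD []   -- as_list[1::3]
    if seps.any (fun sep => sep ≠ "->") then []           -- raise InternalError (excluded by Pre_)
    else
      let keys := (PySem.List.slice? as_list (some 0) none 3).getD []    -- as_list[0::3]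
      let values := (PySem.List.slice? as_list (some 2) none 3).getD []  -- as_list[2::3]
      (PySem.Dict.ofList (keys.zip values)).items

-- ===== PRECONDITION & SPEC =====
-- Pre_ excludes exactly the inputs on which A raises InternalError: a length not divisible
-- by 3, or some separator slot (index ≡ 1 mod 3) not equal to "->".
def Pre_parse_lex_dict (as_list : List String) : Prop :=
  as_list.length % 3 = 0 ∧ ∀ i, i < as_list.length → i % 3 = 1 → as_list.getD i "" = "->"
instance (as_list : List String) : Decidable (Pre_parse_lex_dict as_list) := by
  unfold Pre_parse_lex_dict; infer_instance
def pvWitness_parse_lex_dict : List String := ["cpu", "->", "x86", "os", "->", "linux"]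

def Spec_parse_lex_dict (as_list : List String) (out : List (String × String)) : Prop := out = parse_lex_dict_alt as_list
instance (as_list : List String) (out : List (String × String)) : Decidable (Spec_parse_lex_dict as_list out) := by unfold Spec_parse_lex_dict; infer_instance

-- ===== CLAIM (what is proved, stated in full; the proofs are below) =====
def Claim_equal_parse_lex_dict : Prop := ∀ (as_list : List String), Dom_parse_lex_dict as_list → Pre_parse_lex_dict as_list → Spec_parse_lex_dict as_list (parse_lex_dict as_list)

-- ===== LEMMAS AND PROOFS =====

-- the (key, value) pairs of the well-formed input, row by row: the common normal form
def pvPairs : List String → List (String × String)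
  | k :: _ :: v :: rest => (k, v) :: pvPairs rest
  | _ => []

-- A's triple comprehension peels one row at a time
lemma triples_cons (a b c : String) (rest : List String) :
    (PySem.List.pyRange 0 (PySem.Int.floordiv ((a::b::c::rest).length : Int) 3) 1).map
      (fun i => PySem.List.slice (a::b::c::rest) (some (3*i)) (some (3*i+3)))
    = [a,b,c] :: (PySem.List.pyRange 0 (PySem.Int.floordiv (rest.length : Int) 3) 1).map
      (fun i => PySem.List.slice rest (some (3*i)) (some (3*i+3))) := by
  have hlen : (((a::b::c::rest).length : Nat) : Int) = ((rest.length + 3 : Nat) : Int) := by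
    simp [List.length_cons]; ring
  have hdiv1 : PySem.Int.floordiv (((a::b::c::rest).length : Nat) : Int) 3
      = ((rest.length/3 + 1 : Nat) : Int) := by
    rw [hlen, show ((3:Int) = ((3:Nat):Int)) from rfl, PySem.Int.floordiv_natCast,
       Nat.add_div_right _ (by omega)]
  have hdiv2 : PySem.Int.floordiv ((rest.length : Nat) : Int) 3 = ((rest.length/3 : Nat) : Int) := by
    rw [show ((3:Int) = ((3:Nat):Int)) from rfl, PySem.Int.floordiv_natCast]
  rw [hdiv1, hdiv2, PySem.List.pyRange_one, PySem.List.pyRange_one]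
  have ht1 : (((rest.length / 3 + 1 : Nat) : Int) - 0).toNat = rest.length / 3 + 1 := by omega
  have ht2 : (((rest.length / 3 : Nat) : Int) - 0).toNat = rest.length / 3 := by omega
  rw [ht1, ht2, List.range_succ_eq_map, List.map_cons, List.map_cons, List.map_map, List.map_map]
  congr 1
  simp only [List.map_map]
  apply List.map_congr_left
  intro k hk
  show PySem.List.slice (a::b::c::rest) (some (3*((0:Int) + ((k+1 : Nat):Int)))) (some (3*((0:Int) + ((k+1 : Nat):Int))+3))
      = PySem.List.slice rest (some (3*((0:Int) + ((k : Nat):Int)))) (some (3*((0:Int) + ((k : Nat):Int))+3))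
  have e1 : (3 * ((0:Int) + ((k+1 : Nat):Int))) = (((3*k+3 : Nat)):Int) := by push_cast; ring
  have e2 : (3 * ((0:Int) + ((k+1 : Nat):Int)) + 3) = (((3*k+6 : Nat)):Int) := by push_cast; ring
  have e3 : (3 * ((0:Int) + ((k : Nat):Int))) = (((3*k : Nat)):Int) := by push_cast; ring
  have e4 : (3 * ((0:Int) + ((k : Nat):Int)) + 3) = (((3*k+3 : Nat)):Int) := by push_cast; ring
  rw [e2, e1, e4, e3, PySem.List.slice_natCast, PySem.List.slice_natCast]
  have d1 : (3*k+3) = (3*k)+1+1+1 := by omega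
  rw [d1, List.drop_succ_cons, List.drop_succ_cons, List.drop_succ_cons]
  congr 1
  omega

-- B's stride slices peel one row at a time
lemma stride0_cons (a b c : String) (rest : List String) :
    (PySem.List.slice? (a::b::c::rest) (some 0) none 3).getD []
      = a :: (PySem.List.slice? rest (some 0) none 3).getD [] := by
  simp only [PySem.List.slice?, PySem.List.sliceIndices]
  norm_num
  have h1 : min (0:Int) (↑rest.length + 1 + 1 + 1) = 0 := by omega
  rw [h1]
  have h2 : ((↑rest.length + 1 + 1 + 1 - 0 + 3 - 1 : Int) / 3).toNat
      = (if 0 < rest.length then ((↑rest.length + 3 - 1 : Int) / 3).toNat else 0) + 1 := by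
    by_cases h : 0 < rest.length
    · simp only [if_pos h]; omega
    · simp only [if_neg h]; omega
  rw [h2, if_pos (by omega : (0:Int) ≤ ↑rest.length + 1 + 1), List.range_succ_eq_map,
     List.filterMap_cons, List.filterMap_map]
  simp only [Nat.cast_zero]
  norm_num
  apply List.filterMap_congr
  intro x hx
  have e1 : ((3:Int)*((x:Int)+1)).toNat = 3*x+1+1+1 := by omega
  have e2 : ((3:Int) * (x:Int)).toNat = 3*x := by omega
  simp only [e1, e2, List.getElem?_cons_succ]

lemma stride1_cons (a b c : String) (rest : List String) :
    (PySem.List.slice? (a::b::c::rest) (some 1) none 3).getD []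
      = b :: (PySem.List.slice? rest (some 1) none 3).getD [] := by
  simp only [PySem.List.slice?, PySem.List.sliceIndices]
  norm_num
  have h1 : min (1:Int) (↑rest.length + 1 + 1 + 1) = 1 := by omega
  rw [h1]
  have h2 : ((↑rest.length + 1 + 1 + 1 - 1 + 3 - 1 : Int) / 3).toNat
      = (if 1 < rest.length then ((↑rest.length - min 1 (rest.length:Int) + 3 - 1) / 3).toNat else 0) + 1 := by
    by_cases h : 1 < rest.length
    · simp only [if_pos h]
      have hm : min (1:Int) (↑rest.length) = 1 := by omega
      rw [hm]; omega
    · simp only [if_neg h]; omega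
  rw [h2, if_pos (by omega : (0:Int) ≤ ↑rest.length + 1), List.range_succ_eq_map,
     List.filterMap_cons, List.filterMap_map]
  simp only [Nat.cast_zero]
  norm_num
  by_cases h : rest.length = 0
  · rcases List.length_eq_zero_iff.mp h with rfl
    simp
  · apply List.filterMap_congr
    intro x hx
    have hm : min (1:Int) (↑rest.length) = 1 := by omega
    have e1 : ((1:Int) + 3*((x:Int)+1)).toNat = 3*x+1+1+1+1 := by omega
    have e2 : (min (1:Int) ↑rest.length + 3*(x:Int)).toNat = 3*x+1 := by rw [hm]; omega
    simp only [e1, e2, List.getElem?_cons_succ]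

lemma stride2_cons (a b c : String) (rest : List String) :
    (PySem.List.slice? (a::b::c::rest) (some 2) none 3).getD []
      = c :: (PySem.List.slice? rest (some 2) none 3).getD [] := by
  simp only [PySem.List.slice?, PySem.List.sliceIndices]
  norm_num
  have h1 : min (2:Int) (↑rest.length + 1 + 1 + 1) = 2 := by omega
  rw [h1]
  have h2 : ((↑rest.length + 1 + 1 + 1 - 2 + 3 - 1 : Int) / 3).toNat
      = (if 2 < rest.length then ((↑rest.length - min 2 (rest.length:Int) + 3 - 1) / 3).toNat else 0) + 1 := by
    by_cases h : 2 < rest.length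
    · simp only [if_pos h]
      have hm : min (2:Int) (↑rest.length) = 2 := by omega
      rw [hm]; omega
    · simp only [if_neg h]; omega
  rw [h2, if_pos (by omega : (2:Int) ≤ ↑rest.length + 1 + 1), List.range_succ_eq_map,
     List.filterMap_cons, List.filterMap_map]
  simp only [Nat.cast_zero]
  norm_num
  simp only [show (Int.toNat 2) = 2 from rfl, List.getElem?_cons_succ, List.getElem?_cons_zero]
  by_cases h : rest.length ≤ 2
  · have hr : (if 2 < rest.length then ((↑rest.length - min 2 (rest.length:Int) + 3 - 1) / 3).toNat else 0) = 0 := by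
      rw [if_neg (by omega)]
    rw [hr]
    simp
  · congr 1
    apply List.filterMap_congr
    intro x hx
    have hm : min (2:Int) (↑rest.length) = 2 := by omega
    have e1 : ((2:Int) + 3*((x:Int)+1)).toNat = 3*x+2+1+1+1 := by omega
    have e2 : (min (2:Int) ↑rest.length + 3*(x:Int)).toNat = 3*x+2 := by rw [hm]; omega
    simp only [e1, e2, List.getElem?_cons_succ]

lemma A_eq_fold (xs : List String) (d : PySem.Dict String String)
    (h3 : xs.length % 3 = 0)
    (hsep : ∀ i, i < xs.length → i % 3 = 1 → xs.getD i "" = "->") :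
    pldA_loop
      ((PySem.List.pyRange 0 (PySem.Int.floordiv (xs.length : Int) 3) 1).map
        (fun i => PySem.List.slice xs (some (3*i)) (some (3*i+3)))) d
    = (pvPairs xs).foldl (fun d p => d.insert p.1 p.2) d := by
  induction xs using pvPairs.induct generalizing d with
  | case1 k s v rest ih =>
    have hs : s = "->" := by
      have := hsep 1 (by simp [List.length_cons]) (by norm_num)
      simpa using this
    have h3' : rest.length % 3 = 0 := by
      simp [List.length_cons] at h3; omega
    have hsep' : ∀ i, i < rest.length → i % 3 = 1 → rest.getD i "" = "->" := by
      intro i hi him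
      have := hsep (i+3) (by simp only [List.length_cons]; omega) (by omega)
      simpa [show i+3 = i+1+1+1 from by omega, List.getD_cons_succ] using this
    rw [triples_cons]
    show (if s ≠ "->" then d else pldA_loop _ (d.insert k v)) = _
    rw [if_neg (by simp [hs])]
    rw [ih (d.insert k v) h3' hsep']
    rfl
  | case2 xs h =>
    rcases xs with _ | ⟨x, _ | ⟨y, _ | ⟨z, w⟩⟩⟩
    · rfl
    · simp [List.length_cons] at h3
    · simp [List.length_cons] at h3
    · exact (h x y z w rfl).elim

lemma zip_eq_pairs (xs : List String) (h3 : xs.length % 3 = 0) :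
    ((PySem.List.slice? xs (some 0) none 3).getD []).zip
      ((PySem.List.slice? xs (some 2) none 3).getD []) = pvPairs xs := by
  induction xs using pvPairs.induct with
  | case1 k s v rest ih =>
    have h3' : rest.length % 3 = 0 := by simp [List.length_cons] at h3; omega
    rw [stride0_cons, stride2_cons, List.zip_cons_cons, ih h3']
    rfl
  | case2 xs h =>
    rcases xs with _ | ⟨x, _ | ⟨y, _ | ⟨z, w⟩⟩⟩
    · rfl
    · simp [List.length_cons] at h3
    · simp [List.length_cons] at h3
    · exact (h x y z w rfl).elim

lemma seps_ok (xs : List String) (h3 : xs.length % 3 = 0)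
    (hsep : ∀ i, i < xs.length → i % 3 = 1 → xs.getD i "" = "->") :
    ((PySem.List.slice? xs (some 1) none 3).getD []).any (fun sep => sep ≠ "->") = false := by
  induction xs using pvPairs.induct with
  | case1 k s v rest ih =>
    have hs : s = "->" := by
      have := hsep 1 (by simp [List.length_cons]) (by norm_num)
      simpa using this
    have h3' : rest.length % 3 = 0 := by simp [List.length_cons] at h3; omega
    have hsep' : ∀ i, i < rest.length → i % 3 = 1 → rest.getD i "" = "->" := by
      intro i hi him
      have := hsep (i+3) (by simp only [List.length_cons]; omega) (by omega)
      simpa [show i+3 = i+1+1+1 from by omega, List.getD_cons_succ] using this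
    rw [stride1_cons, List.any_cons, ih h3' hsep', hs]
    simp
  | case2 xs h =>
    rcases xs with _ | ⟨x, _ | ⟨y, _ | ⟨z, w⟩⟩⟩
    · rfl
    · simp [List.length_cons] at h3
    · simp [List.length_cons] at h3
    · exact (h x y z w rfl).elim

lemma B_eq (xs : List String) (h3 : xs.length % 3 = 0)
    (hsep : ∀ i, i < xs.length → i % 3 = 1 → xs.getD i "" = "->") :
    parse_lex_dict_alt xs
      = ((pvPairs xs).foldl (fun d p => d.insert p.1 p.2) PySem.Dict.empty).items := by
  have hm : PySem.Int.mod (xs.length : Int) 3 = 0 := by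
    rw [show ((3:Int) = ((3:Nat):Int)) from rfl, PySem.Int.mod_natCast]
    exact_mod_cast h3
  unfold parse_lex_dict_alt
  rw [if_neg (not_not_intro hm), if_neg (by rw [seps_ok xs h3 hsep]; simp)]
  show (PySem.Dict.ofList (((PySem.List.slice? xs (some 0) none 3).getD []).zip
      ((PySem.List.slice? xs (some 2) none 3).getD []))).items = _
  rw [zip_eq_pairs xs h3]
  rfl

-- ===== VERDICT (by name: the statement is the Claim_ definition above) =====
theorem parse_lex_dict_spec : Claim_equal_parse_lex_dict := by
  intro as_list _ hPre
  obtain ⟨h3, hsep⟩ := hPre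
  unfold Spec_parse_lex_dict
  rw [B_eq as_list h3 hsep]
  have hm : PySem.Int.mod (as_list.length : Int) 3 = 0 := by
    rw [show ((3:Int) = ((3:Nat):Int)) from rfl, PySem.Int.mod_natCast]
    exact_mod_cast h3
  unfold parse_lex_dict
  rw [if_neg (not_not_intro hm), A_eq_fold as_list PySem.Dict.empty h3 hsep]
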